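-- pv_equiv track=rewrite | github.com/enriver/algorithm_python | phase_1/q1316.py | check
-- ===== SOURCE A (Python) =====
-- def check(word):
--     ch=1
--     group=set()
--     now=word[0]
--     group.add(now)
--     for i in word[1:]:
--         if i not in group:
--             group.add(i)
--             now=i
--         else:
--             if i!=now:
--                 ch=0
--                 break
--             else:
--                 ch= 1
--     return ch
-- ===== SOURCE B (Python) =====
-- def check(word):
--     # Collapse the word into its list of run keys (one entry per maximal block
--     # of equal adjacent characters); the word is "grouped" iff no key repeats.
--     runs = []
--     for c in word:
--         if not runs or runs[-1] != c:
--             runs.append(c)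
--     return 1 if len(runs) == len(set(runs)) else 0
-- ===== Notes on version B (the rewrite author's own statement) =====
-- stated objective: simpler
-- what changed: Replaces A's early-breaking state machine (seen-set plus current-run char) by collapsing the word into its list of run keys and comparing that list's length with its deduplicated length.
import Mathlib
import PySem

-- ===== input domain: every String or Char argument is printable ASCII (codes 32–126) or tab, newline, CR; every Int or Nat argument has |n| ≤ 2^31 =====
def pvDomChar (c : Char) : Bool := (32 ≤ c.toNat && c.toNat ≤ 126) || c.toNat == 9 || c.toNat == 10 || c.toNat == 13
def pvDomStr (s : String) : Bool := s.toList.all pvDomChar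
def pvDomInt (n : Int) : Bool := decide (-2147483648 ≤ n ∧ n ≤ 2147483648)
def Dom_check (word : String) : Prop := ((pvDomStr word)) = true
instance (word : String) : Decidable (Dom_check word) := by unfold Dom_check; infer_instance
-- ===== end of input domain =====

-- B collapses the word to its list of run keys and compares it with its dedup;
-- same O(n) cost as A's state-machine scan, but plainer (objective: simpler).

-- ===== PORT A =====
-- the for-loop over word[1:] with its state (ch, group, now); returning 0 models 'break' then 'return ch'
def checkLoopA : List Char → Int → PySem.Set Char → Char → Int
  | [], ch, _, _ => ch
  | i :: rest, ch, group, now =>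
    if PySem.Set.contains group i = false then
      checkLoopA rest ch (PySem.Set.add group i) i
    else if i ≠ now then 0
    else checkLoopA rest 1 group now

def check (word : String) : Int :=
  match word.toList with
  | [] => 0   -- Python raises IndexError here (now = word[0]); excluded by Pre_check
  | c :: rest => checkLoopA rest 1 (PySem.Set.add PySem.Set.empty c) c

-- ===== PORT B =====
-- body of B's for-loop building runs (append c unless runs is nonempty with last element c)
def runsStep (rs : List Char) (c : Char) : List Char :=
  if rs = [] ∨ rs.getLast? ≠ some c then rs ++ [c] else rs

def check_alt (word : String) : Int :=
  let runs := word.toList.foldl runsStep []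
  if runs.length = (PySem.Set.ofList runs).length then 1 else 0

-- ===== PRECONDITION & SPEC =====
-- Pre_ excludes only the empty string, on which A raises IndexError at word[0].
def Pre_check (word : String) : Prop := word ≠ ""
instance (word : String) : Decidable (Pre_check word) := by unfold Pre_check; infer_instance
def pvWitness_check : String := "aabccc"

def Spec_check (word : String) (out : Int) : Prop := out = check_alt word
instance (word : String) (out : Int) : Decidable (Spec_check word out) := by unfold Spec_check; infer_instance

-- ===== CLAIM (what is proved, stated in full; the proofs are below) =====
def Claim_equal_check : Prop := ∀ (word : String), Dom_check word → Pre_check word → Spec_check word (check word)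

-- ===== LEMMAS AND PROOFS =====

-- run keys of the remainder of the word, given the current run's character
def runsFrom : Char → List Char → List Char
  | _, [] => []
  | now, c :: rest => if c = now then runsFrom now rest else c :: runsFrom c rest

theorem checkLoopA_eq (rest : List Char) : ∀ (group : PySem.Set Char) (now : Char),
    now ∈ group →
    checkLoopA rest 1 group now =
      if (runsFrom now rest).Nodup ∧ ∀ c ∈ runsFrom now rest, c ∉ group then 1 else 0 := by
  induction rest with
  | nil => intro group now _; simp [checkLoopA, runsFrom]
  | cons c rest ih =>
    intro group now hnow
    by_cases hc : c = now
    · subst hc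
      have hcon : PySem.Set.contains group c = true := (PySem.Set.contains_iff group c).mpr hnow
      rw [show checkLoopA (c :: rest) 1 group c
            = if PySem.Set.contains group c = false then checkLoopA rest 1 (PySem.Set.add group c) c
              else if c ≠ c then 0 else checkLoopA rest 1 group c from rfl]
      simp only [hcon, Bool.true_eq_false, if_false, ne_eq, not_true_eq_false, if_true,
        runsFrom]
      exact ih group c hnow
    · rw [show checkLoopA (c :: rest) 1 group now
            = if PySem.Set.contains group c = false then checkLoopA rest 1 (PySem.Set.add group c) c
              else if c ≠ now then 0 else checkLoopA rest 1 group now from rfl]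
      by_cases hmem : c ∈ group
      · have hcon : PySem.Set.contains group c = true := (PySem.Set.contains_iff group c).mpr hmem
        rw [hcon]
        simp only [Bool.true_eq_false, if_false, ne_eq, hc, not_false_eq_true, if_true, runsFrom]
        rw [if_neg]
        rintro ⟨-, hall⟩
        exact hall c (by simp) hmem
      · have hcon : PySem.Set.contains group c = false := by
          cases h : PySem.Set.contains group c
          · rfl
          · exact absurd ((PySem.Set.contains_iff group c).mp h) hmem
        rw [hcon, if_pos rfl, ih (PySem.Set.add group c) c ((PySem.Set.mem_add group c c).mpr (Or.inr rfl))]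
        have hiff : ((runsFrom c rest).Nodup ∧ ∀ d ∈ runsFrom c rest, d ∉ PySem.Set.add group c)
            ↔ ((runsFrom now (c :: rest)).Nodup ∧ ∀ d ∈ runsFrom now (c :: rest), d ∉ group) := by
          simp only [runsFrom, if_neg hc, List.nodup_cons, List.mem_cons]
          constructor
          · rintro ⟨hn, hall⟩
            refine ⟨⟨fun hcL => (hall c hcL) ((PySem.Set.mem_add group c c).mpr (Or.inr rfl)), hn⟩, ?_⟩
            rintro d (rfl | hd)
            · exact hmem
            · exact fun hdg => hall d hd ((PySem.Set.mem_add group c d).mpr (Or.inl hdg))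
          · rintro ⟨⟨hcL, hn⟩, hall⟩
            refine ⟨hn, fun d hd hdadd => ?_⟩
            rcases (PySem.Set.mem_add group c d).mp hdadd with hdg | rfl
            · exact hall d (Or.inr hd) hdg
            · exact hcL hd
        rw [if_congr hiff rfl rfl]

theorem foldl_runsStep (rest : List Char) : ∀ (rs : List Char) (now : Char),
    rs.getLast? = some now →
    rest.foldl runsStep rs = rs ++ runsFrom now rest := by
  induction rest with
  | nil => intro rs now _; simp [runsFrom]
  | cons c rest ih =>
    intro rs now hlast
    have hne : rs ≠ [] := by rintro rfl; simp at hlast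
    by_cases hc : c = now
    · subst hc
      have hstep : runsStep rs c = rs := by
        rw [runsStep, if_neg]
        rintro (rfl | hbad)
        · exact hne rfl
        · exact hbad hlast
      simp only [List.foldl_cons, hstep, runsFrom]
      exact ih rs c hlast
    · have hstep : runsStep rs c = rs ++ [c] := by
        rw [runsStep, if_pos]
        exact Or.inr (by rw [hlast]; exact fun h => hc (Option.some_inj.mp h).symm)
      have hlast2 : (rs ++ [c]).getLast? = some c := by simp
      simp only [List.foldl_cons, hstep, runsFrom, if_neg hc]
      rw [ih (rs ++ [c]) c hlast2]
      simp

theorem length_ofList_eq_iff {α : Type} [BEq α] [LawfulBEq α] (xs : List α) :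
    (PySem.Set.ofList xs).length = xs.length ↔ xs.Nodup := by
  induction xs with
  | nil => simp [PySem.Set.ofList_nil]
  | cons x xs ih =>
    rw [PySem.Set.ofList_cons]
    by_cases hx : x ∈ xs
    · simp only [List.nodup_cons, hx, not_true_eq_false, false_and, iff_false]
      have hx2 : x ∈ PySem.Set.ofList xs := (PySem.Set.mem_ofList xs x).mpr hx
      have hdisc : PySem.Set.discard (PySem.Set.ofList xs) x
          = (PySem.Set.ofList xs).filter (fun y => !(y == x)) := by
        simp [PySem.Set.discard]
      have hlt : ((PySem.Set.ofList xs).filter (fun y => !(y == x))).length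
          < (PySem.Set.ofList xs).length := by
        apply List.length_filter_lt_length_iff_exists.mpr
        exact ⟨x, hx2, by simp⟩
      have hle := PySem.Set.length_ofList_le (xs := xs)
      simp only [List.length_cons, hdisc]
      omega
    · have hx2 : x ∉ PySem.Set.ofList xs := fun h => hx ((PySem.Set.mem_ofList xs x).mp h)
      have hdisc : PySem.Set.discard (PySem.Set.ofList xs) x = PySem.Set.ofList xs := by
        rw [show PySem.Set.discard (PySem.Set.ofList xs) x
              = (PySem.Set.ofList xs).filter (fun y => !(y == x)) by simp [PySem.Set.discard]]
        apply List.filter_eq_self.mpr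
        intro a ha
        simp only [Bool.not_eq_eq_eq_not, Bool.not_true, beq_eq_false_iff_ne, ne_eq]
        rintro rfl
        exact hx2 ha
      simp [hdisc, hx, ih]

-- ===== VERDICT (by name: the statement is the Claim_ definition above) =====
theorem check_spec : Claim_equal_check := by
  intro word _ hpre
  unfold Spec_check
  cases hw : word.toList with
  | nil => exact absurd (String.toList_eq_nil_iff.mp hw) hpre
  | cons c rest =>
    have hA : check word = if (runsFrom c rest).Nodup ∧
        ∀ d ∈ runsFrom c rest, d ∉ PySem.Set.add PySem.Set.empty c then 1 else 0 := by
      rw [check, hw]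
      exact checkLoopA_eq rest _ c ((PySem.Set.mem_add _ c c).mpr (Or.inr rfl))
    have hruns : word.toList.foldl runsStep [] = c :: runsFrom c rest := by
      rw [hw, List.foldl_cons, show runsStep [] c = [c] by simp [runsStep],
        foldl_runsStep rest [c] c (by simp)]
      simp
    have hB : check_alt word = if (c :: runsFrom c rest).Nodup then 1 else 0 := by
      rw [check_alt]
      simp only [hruns]
      rw [if_congr (Iff.trans eq_comm (length_ofList_eq_iff _)) rfl rfl]
    rw [hA, hB]
    apply if_congr _ rfl rfl
    simp only [List.nodup_cons]
    constructor
    · rintro ⟨hn, hall⟩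
      refine ⟨fun hcL => ?_, hn⟩
      exact hall c hcL ((PySem.Set.mem_add _ c c).mpr (Or.inr rfl))
    · rintro ⟨hcL, hn⟩
      refine ⟨hn, fun d hd hdmem => ?_⟩
      rcases (PySem.Set.mem_add _ c d).mp hdmem with h | rfl
      · simp [PySem.Set.empty] at h
      · exact hcL hd
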